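-- pv_equiv track=rewrite | github.com/IrinaShcherbakova/Leetcode-Python | leetcode/easy/mostCommonWord.py | parse
-- ===== SOURCE A (Python) =====
-- def parse(par: str, start: int) -> str:
--     ans = []
--     for i in range(start, len(par)):
--         if 'A' <= par[i] <= 'Z':
--             ch = chr(ord(par[i]) + 32)
--             ans.append(ch)
--         elif 'a' <= par[i] <= 'z':
--             ans.append(par[i])
--         else:
--             break
--     return "".join(ans)
-- ===== SOURCE B (Python) =====
-- def parse(par: str, start: int) -> str:
--     s = par[start:]
--     for i, ch in enumerate(s):
--         if not ('A' <= ch <= 'Z' or 'a' <= ch <= 'z'):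
--             return s[:i].lower()
--     return s.lower()
-- ===== Notes on version B (the rewrite author's own statement) =====
-- stated objective: idiomatic
-- what changed: Instead of walking raw indices and building the answer character by character with chr/ord arithmetic, B slices the tail par[start:] once, finds the first non-ASCII-letter position, and returns that letter prefix via a single slice and str.lower().
-- intended difference: For negative start in [-len(par), 0) whose wrapped tail par[start:] is all ASCII letters and par[0] is a letter, A accidentally wraps past the end and re-reads the string from index 0 (e.g. parse('ab',-1) = 'bab'), while B returns just the lowercased letter run of the slice par[start:] ('b'), which is the intended 'word starting at index' value. — e.g. on parse("ab", -1): A returns "bab", B returns "b"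
import Mathlib
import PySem

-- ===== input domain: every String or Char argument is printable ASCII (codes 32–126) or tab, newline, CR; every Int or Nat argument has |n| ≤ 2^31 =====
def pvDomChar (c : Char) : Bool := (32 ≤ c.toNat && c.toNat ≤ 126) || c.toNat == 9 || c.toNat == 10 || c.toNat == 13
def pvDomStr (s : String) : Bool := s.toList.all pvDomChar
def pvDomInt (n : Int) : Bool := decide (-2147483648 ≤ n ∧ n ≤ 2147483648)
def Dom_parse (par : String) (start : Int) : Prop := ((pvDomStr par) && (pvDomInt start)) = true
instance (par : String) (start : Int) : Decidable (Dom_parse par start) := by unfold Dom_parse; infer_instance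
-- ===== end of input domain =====

-- B replaces A's raw-index walk (with chr/ord case analysis and per-char appends) by one slice of
-- the tail, a scan for the first non-letter position, and a single slice + str.lower() (idiomatic).

-- ===== PORT A =====
-- loop 'for i in range(start, len(par))' with break; the `none` branch of pyGet? is Python's
-- IndexError (negative index below -len), excluded by Pre_parse
def parseGo (cs : List Char) : List Int → List Char → List Char
  | [], ans => ans
  | i :: rest, ans =>
    match PySem.List.pyGet? cs i with
    | none => ans
    | some c =>
      if 'A' ≤ c ∧ c ≤ 'Z' then parseGo cs rest (ans ++ [Char.ofNat (c.toNat + 32)])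
      else if 'a' ≤ c ∧ c ≤ 'z' then parseGo cs rest (ans ++ [c])
      else ans

def parse (par : String) (start : Int) : String :=
  String.ofList (parseGo par.toList (PySem.List.pyRange start (par.toList.length : Int)) [])

-- ===== PORT B =====
def isAsciiLetter (c : Char) : Bool := ('A' ≤ c && c ≤ 'Z') || ('a' ≤ c && c ≤ 'z')

-- 'for i, ch in enumerate(s): if not letter: return s[:i].lower()' / 'return s.lower()'
def parseAltGo (s : List Char) : List (Int × Char) → String
  | [] => String.ofList (PySem.Chars.lower s)
  | (i, ch) :: rest =>
    if ¬ isAsciiLetter ch then String.ofList (PySem.Chars.lower (PySem.List.slice s none (some i)))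
    else parseAltGo s rest

def parse_alt (par : String) (start : Int) : String :=
  let s := PySem.List.slice par.toList (some start) none
  parseAltGo s (PySem.List.enumerate s)

-- ===== PRECONDITION & SPEC =====
-- A raises IndexError as soon as it subscripts with start < -len(par); Pre_ admits everything else.
def Pre_parse (par : String) (start : Int) : Prop := -(par.toList.length : Int) ≤ start
instance (par : String) (start : Int) : Decidable (Pre_parse par start) := by
  unfold Pre_parse; infer_instance

def pvWitness_parse : String × Int := ("Bob, hit a ball!", 5)

-- For negative start in [-len(par), 0) whose wrapped tail par[start:] is all ASCII letters while
-- par[0] is also a letter, A accidentally walks past the end and re-reads the string from index 0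
-- (parse "ab" (-1) = "bab"), whereas B returns just the lowercased letter run of the slice
-- par[start:] ("b"), the intended "word starting at this index".
def D_parse (par : String) (start : Int) : Prop :=
  start < 0 ∧ -(par.toList.length : Int) ≤ start ∧
  (par.toList.drop (par.toList.length - (-start).toNat)
    ++ par.toList.take 1).all (fun c => c.isUpper || c.isLower) = true
instance (par : String) (start : Int) : Decidable (D_parse par start) := by
  unfold D_parse; infer_instance

def Spec_parse (par : String) (start : Int) (out : String) : Prop :=
  ¬ D_parse par start → out = parse_alt par start
instance (par : String) (start : Int) (out : String) : Decidable (Spec_parse par start out) := by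
  unfold Spec_parse; infer_instance

def pvDiffWitness_parse : String × Int := ("ab", -1)
def pvDiffWitnessOut_parse : String × String := ("bab", "b")

-- ===== CLAIM (what is proved, stated in full; the proofs are below) =====
def Claim_unchanged_parse : Prop := ∀ (par : String) (start : Int), Dom_parse par start →
  Pre_parse par start → Spec_parse par start (parse par start)
def Claim_changed_parse : Prop := Dom_parse (pvDiffWitness_parse.1) (pvDiffWitness_parse.2) ∧
  Pre_parse (pvDiffWitness_parse.1) (pvDiffWitness_parse.2) ∧
  D_parse (pvDiffWitness_parse.1) (pvDiffWitness_parse.2) ∧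
  parse (pvDiffWitness_parse.1) (pvDiffWitness_parse.2) = pvDiffWitnessOut_parse.1 ∧
  parse_alt (pvDiffWitness_parse.1) (pvDiffWitness_parse.2) = pvDiffWitnessOut_parse.2 ∧
  pvDiffWitnessOut_parse.1 ≠ pvDiffWitnessOut_parse.2
def Claim_exact_parse : Prop := ∀ (par : String) (start : Int), Dom_parse par start →
  Pre_parse par start → D_parse par start → parse par start ≠ parse_alt par start

-- ===== LEMMAS AND PROOFS =====

lemma parseGo_spec (cs : List Char) (idxs : List Int) (t : List Char)
    (h : idxs.map (fun i => PySem.List.pyGet? cs i) = t.map some) (ans : List Char) :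
    parseGo cs idxs ans = ans ++ (t.takeWhile isAsciiLetter).map PySem.Chars.lowerChar := by
  induction idxs generalizing t ans with
  | nil =>
    cases t with
    | nil => simp [parseGo]
    | cons c t' => simp at h
  | cons i rest ih =>
    cases t with
    | nil => simp at h
    | cons c t' =>
      simp only [List.map_cons, List.cons.injEq] at h
      obtain ⟨h1, h2⟩ := h
      by_cases hU : 'A' ≤ c ∧ c ≤ 'Z'
      · have hl : isAsciiLetter c = true := by
          simp [isAsciiLetter, hU.1, hU.2]
        have hlc : PySem.Chars.lowerChar c = Char.ofNat (c.toNat + 32) := by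
          simp [PySem.Chars.lowerChar, PySem.Chars.isupper, hU.1, hU.2]
        have hstep : parseGo cs (i :: rest) ans = parseGo cs rest (ans ++ [Char.ofNat (c.toNat + 32)]) := by
          simp only [parseGo, h1]; rw [if_pos hU]
        rw [hstep, ih t' h2, List.takeWhile_cons, hl]
        simp [hlc]
      · by_cases hL : 'a' ≤ c ∧ c ≤ 'z'
        · have hl : isAsciiLetter c = true := by
            simp [isAsciiLetter, hL.1, hL.2]
          have hlc : PySem.Chars.lowerChar c = c := by
            have hz : ¬ (c ≤ 'Z') := fun hzz => absurd (le_trans hL.1 hzz) (by decide)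
            simp [PySem.Chars.lowerChar, PySem.Chars.isupper, hz]
          have hstep : parseGo cs (i :: rest) ans = parseGo cs rest (ans ++ [c]) := by
            simp only [parseGo, h1]; rw [if_neg hU, if_pos hL]
          rw [hstep, ih t' h2, List.takeWhile_cons, hl]
          simp [hlc]
        · have hl : isAsciiLetter c = false := by
            cases h4 : isAsciiLetter c with
            | false => rfl
            | true =>
              simp only [isAsciiLetter, Bool.or_eq_true, Bool.and_eq_true, decide_eq_true_eq] at h4
              exact absurd h4 (by tauto)
          have hstep : parseGo cs (i :: rest) ans = ans := by
            simp only [parseGo, h1]; rw [if_neg hU, if_neg hL]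
          rw [hstep, List.takeWhile_cons, hl]
          simp

lemma all_takeWhile_self (p : Char → Bool) (l : List Char) (h : l.all p = true) :
    l.takeWhile p = l :=
  List.takeWhile_eq_self_iff.mpr (List.all_eq_true.mp h)

lemma map_pyGet?_range_nonneg (cs : List Char) (k : Nat) :
    (PySem.List.pyRange (k : Int) (cs.length : Int)).map (fun i => PySem.List.pyGet? cs i)
      = (cs.drop k).map some := by
  by_cases hk : k < cs.length
  · rw [PySem.List.pyRange_one_cons (by exact_mod_cast hk)]
    have hstep : ((k : Int) + 1) = ((k + 1 : Nat) : Int) := by push_cast; ring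
    rw [List.map_cons, hstep, map_pyGet?_range_nonneg cs (k + 1)]
    have hget : PySem.List.pyGet? cs (k : Int) = some cs[k] := by
      simp [PySem.List.pyGet?, PySem.List.pyIdx?, hk]
    rw [hget, List.drop_eq_getElem_cons hk, List.map_cons]
  · have hle : cs.length ≤ k := not_lt.mp hk
    have : PySem.List.pyRange (k : Int) (cs.length : Int) = [] := by
      simp [PySem.List.pyRange]; omega
    simp [this, List.drop_eq_nil_of_le hle]
termination_by cs.length - k

lemma map_pyGet?_range_neg (cs : List Char) (m : Nat) (hm : m ≤ cs.length) :
    (PySem.List.pyRange (-(m : Int)) 0).map (fun i => PySem.List.pyGet? cs i)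
      = (cs.drop (cs.length - m)).map some := by
  induction m with
  | zero =>
    have : PySem.List.pyRange 0 0 = ([] : List Int) := by decide
    simp [this, List.drop_eq_nil_of_le (le_refl cs.length)]
  | succ m ih =>
    have hlt : -((m + 1 : Nat) : Int) < 0 := by push_cast; omega
    rw [PySem.List.pyRange_one_cons hlt]
    have hstep : (-((m + 1 : Nat) : Int) + 1) = -(m : Int) := by push_cast; ring
    rw [List.map_cons, hstep, ih (by omega)]
    have hidx : cs.length - (m + 1) < cs.length := by omega
    have hget : PySem.List.pyGet? cs (-((m + 1 : Nat) : Int)) = some cs[cs.length - (m + 1)] := by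
      simp only [PySem.List.pyGet?, PySem.List.pyIdx?]
      have h1 : ¬ (0 ≤ -((m + 1 : Nat) : Int)) := by push_cast; omega
      have h2 : -(cs.length : Int) ≤ -((m + 1 : Nat) : Int) := by push_cast; omega
      rw [if_neg h1, if_pos h2]
      have h3 : (-(-((m + 1 : Nat) : Int))).toNat = m + 1 := by push_cast; omega
      rw [h3]
      simp [List.getElem?_eq_getElem hidx]
    rw [hget, List.drop_eq_getElem_cons hidx]
    have : cs.length - (m + 1) + 1 = cs.length - m := by omega
    rw [this]
    simp

lemma parseAltGo_spec (s : List Char) (k : Nat) (hk : k ≤ s.length)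
    (hpre : (s.take k).all isAsciiLetter = true) :
    parseAltGo s (PySem.List.enumerate (s.drop k) (k : Int))
      = String.ofList (PySem.Chars.lower (s.takeWhile isAsciiLetter)) := by
  by_cases hlt : k < s.length
  · rw [List.drop_eq_getElem_cons hlt, PySem.List.enumerate_cons]
    by_cases hc : isAsciiLetter s[k] = true
    · have hpre' : (s.take (k + 1)).all isAsciiLetter = true := by
        rw [List.take_add_one, List.getElem?_eq_getElem hlt]
        simp only [List.all_append, hpre, Bool.true_and]
        simp [hc]
      have hstep : ((k : Int) + 1) = ((k + 1 : Nat) : Int) := by push_cast; ring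
      simp only [parseAltGo, hc, not_true_eq_false, if_false]
      rw [hstep]
      exact parseAltGo_spec s (k + 1) hlt hpre'
    · have hc' : isAsciiLetter s[k] = false := by simpa using hc
      simp only [parseAltGo, hc', Bool.false_eq_true, not_false_eq_true, if_true]
      have hsl : PySem.List.slice s none (some (k : Int)) = s.take k := by
        rw [PySem.List.slice_to s (by positivity)]
        simp
      rw [hsl]
      congr 1
      have htw : s.takeWhile isAsciiLetter = s.take k := by
        have hdecomp : s = s.take k ++ s[k] :: s.drop (k + 1) := by
          conv_lhs => rw [← List.take_append_drop k s]
          rw [List.drop_eq_getElem_cons hlt]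
        conv_lhs => rw [hdecomp]
        rw [List.takeWhile_append]
        rw [all_takeWhile_self _ _ hpre]
        simp [List.takeWhile_cons, hc, List.length_take_of_le (le_of_lt hlt)]
      rw [htw]
  · have hk' : k = s.length := le_antisymm hk (not_lt.mp hlt)
    subst hk'
    rw [List.drop_length]
    simp only [PySem.List.enumerate, parseAltGo]
    congr 2
    rw [List.take_length] at hpre
    exact (all_takeWhile_self _ _ hpre).symm
termination_by s.length - k

lemma parse_alt_char (par : String) (start : Int) :
    parse_alt par start = String.ofList (PySem.Chars.lower
      ((PySem.List.slice par.toList (some start) none).takeWhile isAsciiLetter)) := by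
  unfold parse_alt
  have := parseAltGo_spec (PySem.List.slice par.toList (some start) none) 0 (Nat.zero_le _)
    (by simp)
  simpa using this

lemma slice_from_clamp {α : Type} (xs : List α) (a : Int) :
    PySem.List.slice xs (some a) none = xs.drop (PySem.List.clampIdx xs.length a) := by
  simp only [PySem.List.slice]
  exact List.take_of_length_le (by simp)

lemma letter_eq (c : Char) : (c.isUpper || c.isLower) = isAsciiLetter c := by
  rw [Bool.eq_iff_iff]
  simp only [Char.isUpper, Char.isLower, isAsciiLetter, Bool.or_eq_true, Bool.and_eq_true,
    decide_eq_true_eq, Char.le_def, ge_iff_le, UInt32.le_iff_toNat_le]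

lemma parse_alt_drop (par : String) (start : Int) :
    parse_alt par start = String.ofList
      (((par.toList.drop (PySem.List.clampIdx par.toList.length start)).takeWhile
        isAsciiLetter).map PySem.Chars.lowerChar) := by
  rw [parse_alt_char, slice_from_clamp]
  simp [PySem.Chars.lower]

lemma parse_char_nonneg (par : String) (start : Int) (h : 0 ≤ start) :
    parse par start = String.ofList
      (((par.toList.drop (PySem.List.clampIdx par.toList.length start)).takeWhile
        isAsciiLetter).map PySem.Chars.lowerChar) := by
  unfold parse
  set cs := par.toList with hcs
  by_cases hs : start ≤ (cs.length : Int)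
  · obtain ⟨k, rfl⟩ : ∃ k : Nat, start = (k : Int) := ⟨start.toNat, by omega⟩
    have hclamp : PySem.List.clampIdx cs.length (k : Int) = k := by
      simp only [PySem.List.clampIdx]
      rw [if_neg (by omega)]
      simp
      omega
    rw [hclamp, parseGo_spec cs _ _ (map_pyGet?_range_nonneg cs k)]
    simp
  · have hr : PySem.List.pyRange start (cs.length : Int) = [] := by
      simp [PySem.List.pyRange]; omega
    have hclamp : PySem.List.clampIdx cs.length start = cs.length := by
      simp only [PySem.List.clampIdx]
      rw [if_neg (by omega)]
      omega
    rw [hr, hclamp]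
    simp [parseGo]

lemma parse_char_neg (par : String) (start : Int) (h0 : start < 0)
    (h1 : -(par.toList.length : Int) ≤ start) :
    parse par start = String.ofList
      ((((par.toList.drop ((par.toList.length : Int) + start).toNat) ++ par.toList).takeWhile
        isAsciiLetter).map PySem.Chars.lowerChar) := by
  unfold parse
  set cs := par.toList with hcs
  set m := (-start).toNat with hm
  have hsm : start = -(m : Int) := by omega
  have hmn : m ≤ cs.length := by omega
  have hsplit : PySem.List.pyRange start (cs.length : Int)
      = PySem.List.pyRange start 0 ++ PySem.List.pyRange 0 (cs.length : Int) :=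
    PySem.List.pyRange_one_append start 0 (cs.length : Int) (le_of_lt h0) (by positivity)
  have hmap : (PySem.List.pyRange start (cs.length : Int)).map (fun i => PySem.List.pyGet? cs i)
      = ((cs.drop (cs.length - m) ++ cs).map some) := by
    rw [hsplit, List.map_append, List.map_append]
    congr 1
    · rw [hsm]; exact map_pyGet?_range_neg cs m hmn
    · have h0' : (0 : Int) = ((0 : Nat) : Int) := by norm_num
      rw [h0', map_pyGet?_range_nonneg cs 0]
      simp
  have hidx : ((cs.length : Int) + start).toNat = cs.length - m := by omega
  rw [parseGo_spec cs _ _ hmap, hidx]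
  simp

-- ===== VERDICT (by name: the statement is the Claim_ definition above) =====
theorem parse_spec : Claim_unchanged_parse := by
  intro par start _ hpre hnd
  unfold Pre_parse at hpre
  by_cases h0 : 0 ≤ start
  · rw [parse_char_nonneg par start h0, parse_alt_drop]
  · push_neg at h0
    rw [parse_char_neg par start h0 hpre, parse_alt_drop]
    set cs := par.toList with hcs
    have hclamp : PySem.List.clampIdx cs.length start = ((cs.length : Int) + start).toNat := by
      simp only [PySem.List.clampIdx]
      rw [if_pos h0, if_neg (by omega)]
    rw [hclamp]
    set t := cs.drop ((cs.length : Int) + start).toNat with ht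
    unfold D_parse at hnd
    rw [show (fun c => c.isUpper || c.isLower) = isAsciiLetter from funext letter_eq] at hnd
    push_neg at hnd
    have hndc : ¬ ((t.all isAsciiLetter && (cs.take 1).all isAsciiLetter) = true) := by
      have h := hnd h0 hpre
      rw [show par.toList.length - (-start).toNat = ((par.toList.length : Int) + start).toNat from by
          have hpre' : -(par.toList.length : Int) ≤ start := hpre
          omega,
        List.all_append] at h
      exact h
    by_cases hall : t.all isAsciiLetter = true
    · have hhead : ¬ ((cs.take 1).all isAsciiLetter = true) := by
        intro hh
        exact hndc (by rw [hall, hh]; rfl)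
      have hlen : (t.takeWhile isAsciiLetter).length = t.length := by
        rw [all_takeWhile_self _ _ hall]
      rw [List.takeWhile_append, if_pos hlen, all_takeWhile_self _ _ hall]
      have hcs0 : 0 < cs.length := by omega
      obtain ⟨c, cs', hcons⟩ : ∃ c cs', cs = c :: cs' := by
        cases hcc : cs with
        | nil => rw [hcc] at hcs0; simp at hcs0
        | cons c cs' => exact ⟨c, cs', rfl⟩
      have hcletter : isAsciiLetter c = false := by
        cases h4 : isAsciiLetter c with
        | false => rfl
        | true =>
          exfalso
          apply hhead
          rw [show cs = c :: cs' from hcons]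
          simp [h4]
      rw [hcons, List.takeWhile_cons, hcletter]
      simp
    · have hne : t.takeWhile isAsciiLetter ≠ t := by
        intro he
        exact hall (List.all_eq_true.mpr (List.takeWhile_eq_self_iff.mp he))
      have hlen : (t.takeWhile isAsciiLetter).length ≠ t.length := fun hl =>
        hne ((List.takeWhile_prefix _).eq_of_length hl)
      rw [List.takeWhile_append, if_neg hlen]

set_option maxRecDepth 8192 in
theorem parse_changed : Claim_changed_parse := by
  unfold Claim_changed_parse; decide

theorem parse_tight : Claim_exact_parse := by
  intro par start _ hpre hd
  obtain ⟨h0, h1, hcomb⟩ := hd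
  rw [show (fun c => c.isUpper || c.isLower) = isAsciiLetter from funext letter_eq,
    show par.toList.length - (-start).toNat = ((par.toList.length : Int) + start).toNat from by omega,
    List.all_append, Bool.and_eq_true] at hcomb
  obtain ⟨hall0, hhead0⟩ := hcomb
  rw [parse_char_neg par start h0 h1, parse_alt_drop]
  set cs := par.toList with hcs
  have hclamp : PySem.List.clampIdx cs.length start = ((cs.length : Int) + start).toNat := by
    simp only [PySem.List.clampIdx]
    rw [if_pos h0, if_neg (by omega)]
  rw [hclamp]
  set t := cs.drop ((cs.length : Int) + start).toNat with ht
  have hall : t.all isAsciiLetter = true := hall0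
  have hlen : (t.takeWhile isAsciiLetter).length = t.length := by
    rw [all_takeWhile_self _ _ hall]
  rw [List.takeWhile_append, if_pos hlen, all_takeWhile_self _ _ hall]
  have hcs0 : 0 < cs.length := by omega
  obtain ⟨c, cs', hcons⟩ : ∃ c cs', cs = c :: cs' := by
    cases hcc : cs with
    | nil => rw [hcc] at hcs0; simp at hcs0
    | cons c cs' => exact ⟨c, cs', rfl⟩
  have hcl : isAsciiLetter c = true := by
    rw [show cs = c :: cs' from hcons] at hhead0
    simpa using hhead0
  intro he
  have hlists := String.ofList_inj.mp he
  have := congrArg List.length hlists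
  rw [hcons] at this
  simp [hcl] at this
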